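-- pv_equiv track=rewrite | github.com/naye0ng/Algorithm | Programmers/이분탐색/예산.py | solution
-- ===== SOURCE A (Python) =====
-- def solution(budgets, M):
--     budgets.sort()
--     N = len(budgets)
--     l, r = 0, N-1
--     # 전체 다 가능한지 체크
--     if sum(budgets) <= M :
--         return budgets[-1]
--     # 전체 다 불가능한지 체크
--     if budgets[0]*N > M :
--         return M//N
--     visited = [False]*N
--     while True :
--         m = (l+r)//2
--         if visited[m] == False :
--             visited[m] = True
--             if sum(budgets[:m+1])+budgets[m]*(N-(m+1)) <= M :
--                 l = m
--             else :
--                 r = m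
--         else : break
--     # 인덱스가 l까지만 가능
--     return(M-sum(budgets[:l+1]))//(N-(l+1))
-- ===== SOURCE B (Python) =====
-- def solution(budgets, M):
--     # Like A, sorts `budgets` in place; equivalence claimed on the return value.
--     budgets.sort()
--     if sum(budgets) <= M:
--         return budgets[-1]
--     N = len(budgets)
--     prefix = 0
--     k = 0
--     for b in budgets:
--         if prefix + b * (N - k) <= M:
--             prefix += b
--             k += 1
--         else:
--             break
--     return (M - prefix) // (N - k)
-- ===== Notes on version B (the rewrite author's own statement) =====
-- stated objective: simpler
-- what changed: A's index binary search with a visited[] array and an O(n) prefix sum recomputed at every probe is replaced by a single left-to-right scan that keeps a running prefix sum and stops at the first budget that no longer fits; the two early-out branches collapse into the scan's own k=0 case.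
import Mathlib
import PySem

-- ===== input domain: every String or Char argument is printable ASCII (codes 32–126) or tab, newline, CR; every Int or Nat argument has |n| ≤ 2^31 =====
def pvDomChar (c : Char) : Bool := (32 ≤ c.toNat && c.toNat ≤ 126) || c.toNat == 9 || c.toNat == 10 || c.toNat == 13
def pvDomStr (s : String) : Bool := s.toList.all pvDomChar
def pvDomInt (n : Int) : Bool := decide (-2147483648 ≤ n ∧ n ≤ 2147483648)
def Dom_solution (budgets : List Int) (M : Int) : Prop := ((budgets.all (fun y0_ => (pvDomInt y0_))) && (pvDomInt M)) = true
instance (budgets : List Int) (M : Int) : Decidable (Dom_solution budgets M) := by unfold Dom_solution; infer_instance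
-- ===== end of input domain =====

-- B replaces A's index binary search (with a visited[] termination array and an O(n) prefix
-- sum recomputed at every probe) by a single left-to-right scan with a running prefix sum.
-- Both Pythons sort `budgets` in place; the equivalence proved here is about the return value.

-- ===== PORT A =====
-- the `while True` loop: each iteration either marks a fresh visited cell or breaks, so
-- N+1 fuel is always enough; the fuel-0 branch is unreachable on admitted inputs.
def solutionGo (s : List Int) (M N : Int) : Nat → Int → Int → List Bool → Int
  | 0, l, _, _ => l
  | fuel+1, l, r, visited =>
    let m := PySem.Int.floordiv (l + r) 2
    if PySem.List.pyGetD visited m false = false then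
      let visited' := PySem.List.pySetD visited m true
      if (PySem.List.slice s none (some (m+1))).sum + (PySem.List.pyGetD s m 0) * (N - (m+1)) ≤ M then
        solutionGo s M N fuel m r visited'
      else
        solutionGo s M N fuel l m visited'
    else l

def solution (budgets : List Int) (M : Int) : Int :=
  let s := PySem.List.sorted budgets (fun x => x) false
  let N : Int := (s.length : Int)
  if s.sum ≤ M then
    PySem.List.pyGetD s (-1) 0
  else if (PySem.List.pyGetD s 0 0) * N > M then
    PySem.Int.floordiv M N
  else
    let visited := List.replicate s.length false
    let l := solutionGo s M N (s.length + 1) 0 (N - 1) visited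
    PySem.Int.floordiv (M - (PySem.List.slice s none (some (l+1))).sum) (N - (l + 1))

-- ===== PORT B =====
def altGo (M N : Int) : List Int → Int → Int → Int × Int
  | [], p, k => (p, k)
  | b :: rest, p, k =>
    if p + b * (N - k) ≤ M then altGo M N rest (p + b) (k + 1)
    else (p, k)

def solution_alt (budgets : List Int) (M : Int) : Int :=
  let s := PySem.List.sorted budgets (fun x => x) false
  if s.sum ≤ M then
    PySem.List.pyGetD s (-1) 0
  else
    let N : Int := (s.length : Int)
    let pk := altGo M N s 0 0
    PySem.Int.floordiv (M - pk.1) (N - pk.2)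

-- ===== PRECONDITION & SPEC =====
-- Pre_ excludes only the empty list, on which A raises (IndexError).
def Pre_solution (budgets : List Int) (M : Int) : Prop := budgets ≠ []
instance (budgets : List Int) (M : Int) : Decidable (Pre_solution budgets M) := by
  unfold Pre_solution; infer_instance
def pvWitness_solution : List Int × Int := ([1, 2, 3], 4)

def Spec_solution (budgets : List Int) (M : Int) (out : Int) : Prop := out = solution_alt budgets M
instance (budgets : List Int) (M : Int) (out : Int) : Decidable (Spec_solution budgets M out) := by unfold Spec_solution; infer_instance

-- ===== CLAIM (what is proved, stated in full; the proofs are below) =====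
def Claim_equal_solution : Prop := ∀ (budgets : List Int) (M : Int), Dom_solution budgets M → Pre_solution budgets M → Spec_solution budgets M (solution budgets M)

-- ===== LEMMAS AND PROOFS =====

-- capped-sum value when everything above index j is capped at s[j] (j full budgets paid)
def gval (s : List Int) (j : Nat) : Int := (s.take j).sum + s.getD j 0 * ((s.length : Int) - j)
-- "index j still fits": the predicate both loops test
def GC (s : List Int) (M : Int) (j : Nat) : Prop := gval s j ≤ M

lemma getD_eq_getElem' (s : List Int) (j : Nat) (hj : j < s.length) : s.getD j 0 = s[j] := by
  rw [List.getD_eq_getElem?_getD, List.getElem?_eq_getElem hj]; rfl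

lemma cond_bridge (s : List Int) (M : Int) (j : Nat) (hj : j < s.length) :
    ((s.take (j+1)).sum + s.getD j 0 * ((s.length : Int) - ((j+1 : Nat) : Int)) ≤ M) ↔ GC s M j := by
  unfold GC gval
  rw [List.sum_take_succ s j hj, getD_eq_getElem' s j hj]
  have e : s[j] + s[j] * ((s.length : Int) - ((j+1 : Nat) : Int))
      = s[j] * ((s.length : Int) - (j : Int)) := by push_cast; ring
  constructor <;> intro h <;> linarith [e]

lemma gval_step (s : List Int) (j : Nat)
    (hmono : ∀ (p q : Nat), p ≤ q → q < s.length → s.getD p 0 ≤ s.getD q 0)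
    (hj : j + 1 < s.length) : gval s j ≤ gval s (j+1) := by
  unfold gval
  have hj' : j < s.length := by omega
  rw [List.sum_take_succ s j hj', getD_eq_getElem' s j hj', getD_eq_getElem' s (j+1) hj]
  have h3 : s[j] ≤ s[j+1] := by
    have := hmono j (j+1) (by omega) hj
    rwa [getD_eq_getElem' s j hj', getD_eq_getElem' s (j+1) hj] at this
  have h4 : (0:Int) ≤ (s.length : Int) - ((j+1 : Nat) : Int) := by push_cast; omega
  have h5 : (0:Int) ≤ (s[j+1] - s[j]) * ((s.length : Int) - ((j+1 : Nat) : Int)) :=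
    mul_nonneg (by linarith) h4
  have e : (s[j+1] - s[j]) * ((s.length : Int) - ((j+1 : Nat) : Int))
      = (s[j] + s[j+1] * ((s.length : Int) - ((j+1 : Nat) : Int)))
        - s[j] * ((s.length : Int) - (j : Int)) := by push_cast; ring
  rw [e] at h5
  linarith

lemma GC_down (s : List Int) (M : Int)
    (hmono : ∀ (p q : Nat), p ≤ q → q < s.length → s.getD p 0 ≤ s.getD q 0)
    (a b : Nat) (hab : a ≤ b) (hb : b < s.length) (hGC : GC s M b) : GC s M a := by
  unfold GC at *
  have : gval s a ≤ gval s b := by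
    clear hGC
    induction b with
    | zero =>
      have ha : a = 0 := by omega
      simp [ha]
    | succ n ih =>
      rcases Nat.lt_or_ge a (n+1) with h | h
      · exact le_trans (ih (by omega) (by omega)) (gval_step s n hmono hb)
      · have : a = n + 1 := by omega
        simp [this]
  linarith

lemma getD_set_bool (xs : List Bool) (n i : Nat) (hn : n < xs.length) :
    (xs.set n true).getD i false = if i = n then true else xs.getD i false := by
  simp only [List.getD_eq_getElem?_getD, List.getElem?_set]
  by_cases h : i = n
  · simp [h, hn]
  · have hni : ¬ (n = i) := fun hh => h (Eq.symm hh)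
    simp [h, hni]

-- the A-side loop: with the interval invariant it returns the unique boundary index
lemma loopGo_spec (s : List Int) (M : Int) :
    ∀ (fuel : Nat) (l r : Nat) (visited : List Bool),
      l < r → r < s.length →
      GC s M l → ¬ GC s M r →
      visited.length = s.length →
      (∀ i : Nat, visited.getD i false = true → i ≤ l ∨ r ≤ i) →
      r - l + 2 ≤ fuel →
      ∃ l' : Nat, solutionGo s M (s.length : Int) fuel (l : Int) (r : Int) visited = (l' : Int) ∧
        l ≤ l' ∧ l' < r ∧ GC s M l' ∧ ¬ GC s M (l' + 1) := by
  intro fuel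
  induction fuel with
  | zero => intro l r visited _ _ _ _ _ _ hfuel; omega
  | succ f ih =>
    intro l r visited hlr hr hGl hGr hvlen hinv hfuel
    have hmidc : PySem.Int.floordiv ((l : Int) + (r : Int)) 2 = (((l + r) / 2 : Nat) : Int) := by
      have := PySem.Int.floordiv_natCast (l + r) 2
      push_cast at this ⊢
      exact this
    simp only [solutionGo, hmidc, PySem.List.pyGetD_natCast, PySem.List.pySetD_natCast]
    set mid := (l + r) / 2 with hmid
    have hlm : l ≤ mid := by omega
    have hmr : mid < r := by omega
    by_cases hv : visited.getD mid false = false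
    · rw [if_pos hv]
      rw [show ((mid : Int) + 1) = ((mid + 1 : Nat) : Int) by push_cast; ring,
          PySem.List.slice_to_natCast]
      by_cases hc : GC s M mid
      · rw [if_pos ((cond_bridge s M mid (by omega)).mpr hc)]
        by_cases hml : mid = l
        · -- r = l + 1; one more step breaks on the freshly visited mid
          have hrl : r = l + 1 := by omega
          obtain ⟨f', rfl⟩ : ∃ f', f = f' + 1 := ⟨f - 1, by omega⟩
          have hmid2 : (mid + r) / 2 = mid := by omega
          have hmidc2 : PySem.Int.floordiv ((mid : Int) + (r : Int)) 2 = ((mid : Nat) : Int) := by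
            have := PySem.Int.floordiv_natCast (mid + r) 2
            rw [hmid2] at this
            push_cast at this ⊢
            exact this
          simp only [solutionGo, hmidc2, PySem.List.pyGetD_natCast]
          rw [getD_set_bool visited mid mid (by omega)]
          refine ⟨mid, by simp, by omega, by omega, hc, ?_⟩
          rw [hml, ← hrl]
          exact hGr
        · obtain ⟨l', h1, h2, h3, h4, h5⟩ :=
            ih mid r (visited.set mid true) (by omega) hr hc hGr (by simp [hvlen])
              (by intro i hi
                  rw [getD_set_bool visited mid i (by omega)] at hi
                  by_cases him : i = mid
                  · left; omega
                  · rw [if_neg him] at hi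
                    rcases hinv i hi with h | h
                    · left; omega
                    · right; exact h)
              (by omega)
          exact ⟨l', h1, by omega, h3, h4, h5⟩
      · rw [if_neg ((fun hh => hc ((cond_bridge s M mid (by omega)).mp hh)))]
        have hml : l < mid := by
          by_contra h
          have hme : mid = l := by omega
          rw [hme] at hc
          exact hc hGl
        obtain ⟨l', h1, h2, h3, h4, h5⟩ :=
          ih l mid (visited.set mid true) hml (by omega) hGl hc (by simp [hvlen])
            (by intro i hi
                rw [getD_set_bool visited mid i (by omega)] at hi
                by_cases him : i = mid
                · right; omega
                · rw [if_neg him] at hi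
                  rcases hinv i hi with h | h
                  · left; exact h
                  · right; omega)
            (by omega)
        exact ⟨l', h1, h2, by omega, h4, h5⟩
    · rw [if_neg hv]
      have hvt : visited.getD mid false = true := by
        cases h : visited.getD mid false
        · exact absurd h hv
        · rfl
      have := hinv mid hvt
      have hml : mid = l := by omega
      have hrl : r = l + 1 := by omega
      exact ⟨l, rfl, le_refl l, hlr, hGl, by rw [← hrl]; exact hGr⟩

-- the B-side scan: stops at the first index that no longer fits
lemma altGo_spec (s : List Int) (M : Int) :
    ∀ (d k : Nat), k + d = s.length →
      (∃ j, k ≤ j ∧ j < s.length ∧ ¬ GC s M j) →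
      ∃ k', altGo M (s.length : Int) (s.drop k) ((s.take k).sum) (k : Int)
              = ((s.take k').sum, (k' : Int)) ∧
        k ≤ k' ∧ k' < s.length ∧ ¬ GC s M k' ∧ ∀ j, k ≤ j → j < k' → GC s M j := by
  intro d
  induction d with
  | zero =>
    intro k hk ⟨j, hj1, hj2, _⟩
    omega
  | succ d ih =>
    intro k hk hbad
    have hkl : k < s.length := by omega
    rw [List.drop_eq_getElem_cons hkl]
    simp only [altGo]
    have hcond : ((s.take k).sum + s[k] * ((s.length : Int) - (k : Int)) ≤ M) ↔ GC s M k := by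
      unfold GC gval
      rw [getD_eq_getElem' s k hkl]
    by_cases hGC : GC s M k
    · rw [if_pos (hcond.mpr hGC)]
      rw [show (s.take k).sum + s[k] = (s.take (k+1)).sum from (List.sum_take_succ s k hkl).symm,
          show ((k : Int) + 1) = ((k + 1 : Nat) : Int) by push_cast; ring]
      obtain ⟨j, hj1, hj2, hj3⟩ := hbad
      have hjk : k + 1 ≤ j := by
        rcases Nat.eq_or_lt_of_le hj1 with h | h
        · exact absurd (h ▸ hGC) hj3
        · omega
      obtain ⟨k', h1, h2, h3, h4, h5⟩ := ih (k+1) (by omega) ⟨j, hjk, hj2, hj3⟩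
      refine ⟨k', h1, by omega, h3, h4, ?_⟩
      intro j' hj'1 hj'2
      rcases Nat.eq_or_lt_of_le hj'1 with h | h
      · exact h ▸ hGC
      · exact h5 j' (by omega) hj'2
    · rw [if_neg (fun hh => hGC (hcond.mp hh))]
      exact ⟨k, rfl, le_refl k, hkl, hGC, fun j hj1 hj2 => by omega⟩

-- both branches of A after the sort, against B's scan, for any list with monotone entries
lemma core (s : List Int) (M : Int) (hne : s ≠ [])
    (hmono : ∀ (p q : Nat), p ≤ q → q < s.length → s.getD p 0 ≤ s.getD q 0) :
    (if s.sum ≤ M then PySem.List.pyGetD s (-1) 0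
     else if PySem.List.pyGetD s 0 0 * (s.length : Int) > M then
       PySem.Int.floordiv M (s.length : Int)
     else
       let l := solutionGo s M (s.length : Int) (s.length + 1) 0 ((s.length : Int) - 1)
                  (List.replicate s.length false)
       PySem.Int.floordiv (M - (PySem.List.slice s none (some (l+1))).sum)
         ((s.length : Int) - (l + 1)))
    =
    (if s.sum ≤ M then PySem.List.pyGetD s (-1) 0
     else
       let pk := altGo M (s.length : Int) s 0 0
       PySem.Int.floordiv (M - pk.1) ((s.length : Int) - pk.2)) := by
  have hlen : 1 ≤ s.length := List.length_pos_iff.mpr hne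
  by_cases hsum : s.sum ≤ M
  · simp [hsum]
  · simp only [if_neg hsum]
    have hGtop : ¬ GC s M (s.length - 1) := by
      unfold GC gval
      intro h
      apply hsum
      have h1 : s.length - 1 < s.length := by omega
      have h2 : (s.take (s.length - 1 + 1)).sum = (s.take (s.length - 1)).sum + s[s.length - 1] :=
        List.sum_take_succ s (s.length - 1) h1
      rw [show s.length - 1 + 1 = s.length by omega, List.take_length] at h2
      have h3 : ((s.length : Int) - ((s.length - 1 : Nat) : Int)) = 1 := by
        push_cast [hlen]; ring
      rw [getD_eq_getElem' s _ h1, h3, mul_one] at h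
      linarith
    have hGC0iff : GC s M 0 ↔ s.getD 0 0 * (s.length : Int) ≤ M := by
      unfold GC gval
      simp
    by_cases hbig : PySem.List.pyGetD s 0 0 * (s.length : Int) > M
    · simp only [if_pos hbig]
      have hGC0 : ¬ GC s M 0 := by
        rw [hGC0iff, PySem.List.pyGetD_zero] at *
        omega
      obtain ⟨k', h1, _, _, _, hall⟩ :=
        altGo_spec s M s.length 0 (by omega) ⟨0, le_refl 0, by omega, hGC0⟩
      have hk0 : k' = 0 := by
        by_contra h
        exact hGC0 (hall 0 (by omega) (by omega))
      rw [hk0] at h1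
      simp only [List.drop_zero, List.take_zero, List.sum_nil, Nat.cast_zero] at h1
      rw [h1]
      simp
    · simp only [if_neg hbig]
      rw [not_lt] at hbig
      have hGC0 : GC s M 0 := by
        rw [hGC0iff, ← PySem.List.pyGetD_zero s 0]
        exact hbig
      have hlen2 : 2 ≤ s.length := by
        by_contra h
        have h1 : s.length = 1 := by omega
        apply hsum
        unfold GC gval at hGC0
        obtain ⟨a, rfl⟩ := List.length_eq_one_iff.mp h1
        simpa using hGC0
      obtain ⟨l', hl'eq, _, hl'r, hGl', hGl'1⟩ :=
        loopGo_spec s M (s.length + 1) 0 (s.length - 1) (List.replicate s.length false)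
          (by omega) (by omega) hGC0 hGtop (List.length_replicate)
          (by intro i hi
              simp only [List.getD_eq_getElem?_getD, List.getElem?_replicate] at hi
              split at hi <;> simp_all)
          (by omega)
      obtain ⟨k', hk'eq, _, _, hGk', hall⟩ :=
        altGo_spec s M s.length 0 (by omega) ⟨s.length - 1, by omega, by omega, hGtop⟩
      have hkl : k' = l' + 1 := by
        by_contra h
        rcases Nat.lt_or_ge k' (l' + 1) with hlt | hge
        · exact hGk' (GC_down s M hmono k' l' (by omega) (by omega) hGl')
        · exact hGl'1 (hall (l' + 1) (by omega) (by omega))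
      rw [hkl] at hk'eq
      simp only [List.drop_zero, List.take_zero, List.sum_nil, Nat.cast_zero] at hk'eq
      rw [show ((s.length - 1 : Nat) : Int) = (s.length : Int) - 1 from by push_cast [hlen]; ring,
          Nat.cast_zero] at hl'eq
      rw [hl'eq, hk'eq]
      rw [show ((l' : Int) + 1) = ((l' + 1 : Nat) : Int) by push_cast; ring,
          PySem.List.slice_to_natCast]

-- ===== VERDICT (by name: the statement is the Claim_ definition above) =====
theorem solution_spec : Claim_equal_solution := by
  intro budgets M _ hpre
  unfold Spec_solution solution solution_alt
  have hne : PySem.List.sorted budgets (fun x => x) false ≠ [] := by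
    intro h
    exact hpre ((PySem.List.sorted_eq_nil_iff budgets (fun x => x) false).mp h)
  have hmono : ∀ (p q : Nat), p ≤ q →
      q < (PySem.List.sorted budgets (fun x => x) false).length →
      (PySem.List.sorted budgets (fun x => x) false).getD p 0 ≤
      (PySem.List.sorted budgets (fun x => x) false).getD q 0 := by
    intro p q hpq hq
    rw [getD_eq_getElem' _ p (by omega), getD_eq_getElem' _ q hq]
    exact PySem.List.sorted_id_getElem_mono budgets hpq hq
  exact core (PySem.List.sorted budgets (fun x => x) false) M hne hmono
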